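-- pv_equiv track=rewrite | github.com/agathazeren/hopscotch | hopscotch.py | proc_code
-- ===== SOURCE A (Python) =====
-- code_chars = "+<>^/\\!*?@_-0123456789"
--
-- cmd_chars = "+<>^/\\!*?@_"
--
-- num_chars = "-0123456789"
--
-- def proc_code(c):
--     x = []
--     n = ""
--     for char in c:
--         if char in num_chars:
--
--                 n+=char
--         if char not in num_chars and n != "" and char in code_chars:
--             x.append(n)
--             n = ""
--         if char not in code_chars:
--             pass
--         if char in cmd_chars:
--             x.append(char)
--     return x
-- ===== SOURCE B (Python) =====
-- def proc_code(c):
--     num = "-0123456789"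
--     cmd = "+<>^/\\!*?@_"
--     s = [ch for ch in c if ch in cmd or ch in num]
--     toks = []
--     i = 0
--     while i < len(s):
--         if s[i] in cmd:
--             toks.append(s[i])
--             i += 1
--         else:
--             j = i
--             while j < len(s) and s[j] in num:
--                 j += 1
--             if j < len(s):  # a number run is a token only when terminated by a command
--                 toks.append(''.join(s[i:j]))
--             i = j
--     return toks
-- ===== Notes on version B (the rewrite author's own statement) =====
-- stated objective: alternative
-- what changed: Replaces A's per-character accumulator-and-flush state machine (pending number string rebuilt by += and three membership tests per char) with a filter pass that drops non-code characters followed by a run-grabbing index scan that emits single command chars and maximal number runs terminated by a command.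
import Mathlib
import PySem

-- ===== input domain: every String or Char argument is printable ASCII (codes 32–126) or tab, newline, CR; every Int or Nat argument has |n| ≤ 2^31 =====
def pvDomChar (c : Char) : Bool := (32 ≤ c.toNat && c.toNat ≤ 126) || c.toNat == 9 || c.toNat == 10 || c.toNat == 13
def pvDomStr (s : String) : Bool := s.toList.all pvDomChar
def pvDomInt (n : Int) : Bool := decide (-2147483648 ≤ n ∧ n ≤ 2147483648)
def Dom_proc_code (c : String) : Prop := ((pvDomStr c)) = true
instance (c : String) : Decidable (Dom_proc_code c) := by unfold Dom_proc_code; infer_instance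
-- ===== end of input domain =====

-- B replaces A's per-character accumulator-and-flush state machine by a filter pass plus a
-- run-grabbing scan (alternative decomposition, same cost).

-- ===== PORT A =====
-- the module's string constants, as character lists
def code_chars : List Char := ['+','<','>','^','/','\\','!','*','?','@','_','-','0','1','2','3','4','5','6','7','8','9']
def cmd_chars : List Char := ['+','<','>','^','/','\\','!','*','?','@','_']
def num_chars : List Char := ['-','0','1','2','3','4','5','6','7','8','9']

-- one iteration of A's for-loop over the state (x, n)
def procA_step (st : List String × List Char) (char : Char) : List String × List Char :=
  let n := if char ∈ num_chars then st.2 ++ [char] else st.2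
  let xn := if char ∉ num_chars ∧ n ≠ [] ∧ char ∈ code_chars
            then (st.1 ++ [String.ofList n], ([] : List Char)) else (st.1, n)
  if char ∈ cmd_chars then (xn.1 ++ [String.ofList [char]], xn.2) else xn

def proc_code (c : String) : List String :=
  (c.toList.foldl procA_step ([], [])).1

-- ===== PORT B =====
-- Source B's outer while-loop as structural recursion; in the number branch the run always starts
-- with the current char (on the filtered input s[i] is a number char there, so taking it
-- unconditionally is exact).
def procB_scan : List Char → List String
  | [] => []
  | ch :: rest =>
    if ch ∈ cmd_chars then String.ofList [ch] :: procB_scan rest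
    else
      let run := ch :: rest.takeWhile (fun a => decide (a ∈ num_chars))
      let rest' := rest.dropWhile (fun a => decide (a ∈ num_chars))
      if rest' = [] then [] else String.ofList run :: procB_scan rest'
termination_by l => l.length
decreasing_by simp; exact Nat.lt_succ_of_le (List.length_dropWhile_le _ _)

def proc_code_alt (c : String) : List String :=
  procB_scan (c.toList.filter (fun ch => decide (ch ∈ cmd_chars ∨ ch ∈ num_chars)))

-- ===== PRECONDITION & SPEC =====
def Spec_proc_code (c : String) (out : List String) : Prop := out = proc_code_alt c
instance (c : String) (out : List String) : Decidable (Spec_proc_code c out) := by unfold Spec_proc_code; infer_instance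

-- ===== CLAIM (what is proved, stated in full; the proofs are below) =====
def Claim_equal_proc_code : Prop := ∀ (c : String), Dom_proc_code c → Spec_proc_code c (proc_code c)

-- ===== LEMMAS AND PROOFS =====

lemma code_eq_append : code_chars = cmd_chars ++ num_chars := by decide

lemma mem_code_iff (ch : Char) : ch ∈ code_chars ↔ ch ∈ cmd_chars ∨ ch ∈ num_chars := by
  rw [code_eq_append]; exact List.mem_append

lemma num_not_cmd {ch : Char} (h : ch ∈ num_chars) : ch ∉ cmd_chars := by
  intro hc
  simp only [num_chars, List.mem_cons, List.not_mem_nil, or_false] at h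
  rcases h with rfl | rfl | rfl | rfl | rfl | rfl | rfl | rfl | rfl | rfl | rfl <;> exact absurd hc (by decide)

lemma dropWhile_all {l : List Char} (h : ∀ a ∈ l, a ∈ num_chars) :
    l.dropWhile (fun a => decide (a ∈ num_chars)) = [] := by
  induction l with
  | nil => rfl
  | cons a t ih =>
    have ha : a ∈ num_chars := h a (List.mem_cons_self)
    have ht : ∀ b ∈ t, b ∈ num_chars := fun b hb => h b (List.mem_cons_of_mem _ hb)
    simp [ha, ih ht]

lemma takeWhile_run {l r : List Char} (h : ∀ a ∈ l, a ∈ num_chars) {c : Char}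
    (hc : c ∉ num_chars) :
    (l ++ c :: r).takeWhile (fun a => decide (a ∈ num_chars)) = l := by
  induction l with
  | nil => simp [hc]
  | cons a t ih =>
    have ha : a ∈ num_chars := h a (List.mem_cons_self)
    have ht : ∀ b ∈ t, b ∈ num_chars := fun b hb => h b (List.mem_cons_of_mem _ hb)
    simp [ha, ih ht]

lemma dropWhile_run {l r : List Char} (h : ∀ a ∈ l, a ∈ num_chars) {c : Char}
    (hc : c ∉ num_chars) :
    (l ++ c :: r).dropWhile (fun a => decide (a ∈ num_chars)) = c :: r := by
  induction l with
  | nil => simp [hc]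
  | cons a t ih =>
    have ha : a ∈ num_chars := h a (List.mem_cons_self)
    have ht : ∀ b ∈ t, b ∈ num_chars := fun b hb => h b (List.mem_cons_of_mem _ hb)
    simp [ha, ih ht]

-- pending digits followed by nothing: B emits nothing (the run is not terminated)
lemma scan_pending_nil {n : List Char} (hn : ∀ a ∈ n, a ∈ num_chars) :
    procB_scan n = [] := by
  cases n with
  | nil => rw [procB_scan]
  | cons a t =>
    have ha : a ∈ num_chars := hn a (List.mem_cons_self)
    have ht : ∀ b ∈ t, b ∈ num_chars := fun b hb => hn b (List.mem_cons_of_mem _ hb)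
    rw [procB_scan]
    simp [num_not_cmd ha, dropWhile_all ht]

-- pending digits followed by a command char: B emits the run then continues at the command
lemma scan_pending_cmd {n : List Char} (hn : ∀ a ∈ n, a ∈ num_chars) (hne : n ≠ [])
    {c : Char} (hc : c ∈ cmd_chars) (f : List Char) :
    procB_scan (n ++ c :: f) = String.ofList n :: procB_scan (c :: f) := by
  cases n with
  | nil => exact absurd rfl hne
  | cons a t =>
    have ha : a ∈ num_chars := hn a (List.mem_cons_self)
    have ht : ∀ b ∈ t, b ∈ num_chars := fun b hb => hn b (List.mem_cons_of_mem _ hb)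
    have hcn : c ∉ num_chars := fun h => num_not_cmd h hc
    rw [List.cons_append, procB_scan]
    simp [num_not_cmd ha, takeWhile_run ht hcn, dropWhile_run ht hcn]

-- loop invariant: A's fold from state (x, n) equals x ++ B's scan of n ++ the filtered rest
lemma key (cs : List Char) (x : List String) (n : List Char)
    (hn : ∀ a ∈ n, a ∈ num_chars) :
    (cs.foldl procA_step (x, n)).1
      = x ++ procB_scan (n ++ cs.filter (fun ch => decide (ch ∈ cmd_chars ∨ ch ∈ num_chars))) := by
  induction cs generalizing x n with
  | nil => simp [scan_pending_nil hn]
  | cons ch cs ih =>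
    rw [List.foldl_cons]
    by_cases hnum : ch ∈ num_chars
    · have hstep : procA_step (x, n) ch = (x, n ++ [ch]) := by
        simp [procA_step, hnum, num_not_cmd hnum]
      have hn' : ∀ a ∈ n ++ [ch], a ∈ num_chars := by
        intro a ha
        rcases List.mem_append.mp ha with h | h
        · exact hn a h
        · simp at h; simpa [h] using hnum
      have hd : decide (ch ∈ cmd_chars ∨ ch ∈ num_chars) = true :=
        decide_eq_true (Or.inr hnum)
      rw [hstep, ih _ _ hn', List.filter_cons, hd]
      simp
    · by_cases hcmd : ch ∈ cmd_chars
      · have hcode : ch ∈ code_chars := (mem_code_iff ch).mpr (Or.inl hcmd)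
        have hd : decide (ch ∈ cmd_chars ∨ ch ∈ num_chars) = true :=
          decide_eq_true (Or.inl hcmd)
        by_cases hne : n = []
        · subst hne
          have hstep : procA_step (x, []) ch = (x ++ [String.ofList [ch]], []) := by
            simp [procA_step, hnum, hcmd]
          rw [hstep, ih _ _ (by simp), List.filter_cons, hd]
          simp [procB_scan, hcmd]
        · have hstep : procA_step (x, n) ch
              = (x ++ [String.ofList n] ++ [String.ofList [ch]], []) := by
            simp [procA_step, hnum, hcmd, hne, hcode]
          rw [hstep, ih _ _ (by simp)]
          have hf : (ch :: cs).filter (fun ch => decide (ch ∈ cmd_chars ∨ ch ∈ num_chars))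
              = ch :: cs.filter (fun ch => decide (ch ∈ cmd_chars ∨ ch ∈ num_chars)) := by
            simp [hcmd]
          rw [hf, scan_pending_cmd hn hne hcmd]
          simp [procB_scan, hcmd]
      · have hcode : ch ∉ code_chars := fun h => by
          rcases (mem_code_iff ch).mp h with h' | h'
          · exact hcmd h'
          · exact hnum h'
        have hstep : procA_step (x, n) ch = (x, n) := by
          simp [procA_step, hnum, hcmd, hcode]
        have hd : decide (ch ∈ cmd_chars ∨ ch ∈ num_chars) = false := by
          simp [hnum, hcmd]
        rw [hstep, ih _ _ hn, List.filter_cons, hd]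
        simp

-- ===== VERDICT (by name: the statement is the Claim_ definition above) =====
theorem proc_code_spec : Claim_equal_proc_code := by
  intro c _
  show proc_code c = proc_code_alt c
  unfold proc_code proc_code_alt
  simpa using key c.toList [] [] (by simp)
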